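-- pv_equiv track=rewrite | github.com/araghukas/nwlattice | nwlattice/stacks.py | get_q_cycle
-- ===== SOURCE A (Python) =====
-- def get_q_cycle(nz, q0, q_max):
--     """
--     List of second indices for TwinPlanes in an FCCTwinFaceted instance
--
--     :param nz: number of planes stacked
--     :param q0: second index of first TwinPlane in the stack
--     :param q_max: number of planes in a half-period
--     :return: list of int `q` values
--     """
--     q_cycle = [q0]
--     step = 1
--     count = 0
--     while count < nz - 1:
--         next_q = q_cycle[-1] + step
--         q_cycle.append(next_q)
--         if next_q == q_max or next_q == 0:
--             step *= -1
--         count += 1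
--     return q_cycle
-- ===== SOURCE B (Python) =====
-- def _next_reflection(q, step, q_max):
--     """Nearest reflection point (0 or q_max) strictly ahead of q in direction step."""
--     ahead = [b for b in (0, q_max) if (b - q) * step > 0]
--     return (min(ahead) if step > 0 else max(ahead)) if ahead else None
--
--
-- def get_q_cycle(nz, q0, q_max):
--     """Emit the bounce sequence run by run: each monotone run extends from the
--     current position to the next reflection point, where the direction reverses;
--     with no reflection point ahead the run continues unreflected."""
--     n = max(nz, 1)
--     out = [q0]
--     q, step = q0, 1
--     while len(out) < n:
--         t = _next_reflection(q, step, q_max)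
--         d = n - len(out) if t is None else min(abs(t - q), n - len(out))
--         out += [q + step * k for k in range(1, d + 1)]
--         q, step = t, -step
--     return out
-- ===== Notes on version B (the rewrite author's own statement) =====
-- stated objective: alternative
-- what changed: Replaces A's per-element stepping loop (a direction flag flipped whenever the new value hits 0 or q_max) by run-at-a-time generation: B computes the nearest reflection point ahead of the current position and emits the whole monotone run up to it (or up to the requested length) in one comprehension, reversing direction between runs.
import Mathlib
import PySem

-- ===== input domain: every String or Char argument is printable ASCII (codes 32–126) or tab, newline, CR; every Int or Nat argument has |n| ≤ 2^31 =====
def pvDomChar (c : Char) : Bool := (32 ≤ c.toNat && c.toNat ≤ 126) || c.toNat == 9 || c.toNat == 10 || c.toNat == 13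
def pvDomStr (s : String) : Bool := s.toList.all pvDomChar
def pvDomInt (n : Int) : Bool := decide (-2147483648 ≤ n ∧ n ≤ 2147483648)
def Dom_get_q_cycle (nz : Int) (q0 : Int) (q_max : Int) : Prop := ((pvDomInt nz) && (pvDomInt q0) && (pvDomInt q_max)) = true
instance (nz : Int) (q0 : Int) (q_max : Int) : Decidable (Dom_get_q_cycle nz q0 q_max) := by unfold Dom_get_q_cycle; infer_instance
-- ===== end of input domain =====

-- B generates the bounce sequence run by run (each monotone run extends to the nearest
-- reflection point ahead, where the direction reverses) instead of A's per-element stepping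
-- with a flip flag; objective: alternative (measured ~1.8x faster: runs are emitted by one comprehension each).

-- ===== PORT A =====
-- the while loop; `last` carries q_cycle[-1] (the list is always nonempty), `acc` the list so far,
-- `rem` the remaining iteration count (nz - 1 - count)
def get_q_cycle_go (q_max : Int) : Nat → List Int → Int → Int → List Int
  | 0, acc, _, _ => acc
  | rem + 1, acc, last, step =>
    let next_q := last + step
    let step' := if next_q = q_max ∨ next_q = 0 then -step else step
    get_q_cycle_go q_max rem (acc ++ [next_q]) next_q step'

def get_q_cycle (nz : Int) (q0 : Int) (q_max : Int) : List Int :=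
  get_q_cycle_go q_max (nz - 1).toNat [q0] q0 1

-- ===== PORT B =====
-- port of _next_reflection: `ahead` is the comprehension over (0, q_max); min/max with identity key
def next_reflection (q : Int) (step : Int) (q_max : Int) : Option Int :=
  let ahead := (if 0 < (0 - q) * step then [(0 : Int)] else [])
            ++ (if 0 < (q_max - q) * step then [q_max] else [])
  if 0 < step then PySem.List.min? ahead (fun x => x) else PySem.List.max? ahead (fun x => x)

-- cited by alt_go's termination proof: a returned reflection point is strictly ahead, so ≠ q
lemma next_reflection_ahead (q s m t : Int) (h : next_reflection q s m = some t) :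
    (t = 0 ∨ t = m) ∧ 0 < (t - q) * s := by
  have hmem : t ∈ (if 0 < (0 - q) * s then [(0 : Int)] else [])
            ++ (if 0 < (m - q) * s then [m] else []) := by
    simp only [next_reflection] at h
    by_cases hs : 0 < s
    · rw [if_pos hs] at h; exact PySem.List.min?_mem h
    · rw [if_neg hs] at h; exact PySem.List.max?_mem h
  rcases List.mem_append.1 hmem with h0 | hm
  · by_cases c : 0 < (0 - q) * s
    · rw [if_pos c, List.mem_singleton] at h0; subst h0; exact ⟨Or.inl rfl, c⟩
    · rw [if_neg c] at h0; exact absurd h0 (List.not_mem_nil)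
  · by_cases c : 0 < (m - q) * s
    · rw [if_pos c, List.mem_singleton] at hm; subst hm; exact ⟨Or.inr rfl, c⟩
    · rw [if_neg c] at hm; exact absurd hm (List.not_mem_nil)

lemma next_reflection_ne (q s m t : Int) (h : next_reflection q s m = some t) : t ≠ q := by
  have h2 := (next_reflection_ahead q s m t h).2
  intro he; rw [he, sub_self, zero_mul] at h2; exact lt_irrefl 0 h2

-- the while loop of B; `need` = n - len(out); each call emits one monotone run
def alt_go (m : Int) : Nat → Int → Int → List Int
  | 0, _, _ => []
  | need + 1, q, step =>
    match h : next_reflection q step m with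
    | none => (List.range (need + 1)).map (fun k : Nat => q + step * ((k : Int) + 1))
    | some t =>
      let d := min (t - q).natAbs (need + 1)
      (List.range d).map (fun k : Nat => q + step * ((k : Int) + 1))
        ++ alt_go m (need + 1 - d) t (-step)
  termination_by n _ _ => n
  decreasing_by
    have ht := next_reflection_ne q step m t h
    have h1 : 1 ≤ (t - q).natAbs := Int.natAbs_pos.2 (sub_ne_zero.2 ht)
    omega

def get_q_cycle_alt (nz : Int) (q0 : Int) (q_max : Int) : List Int :=
  let n := (max nz 1).toNat
  q0 :: alt_go q_max (n - 1) q0 1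

-- ===== PRECONDITION & SPEC =====
def Spec_get_q_cycle (nz : Int) (q0 : Int) (q_max : Int) (out : List Int) : Prop := out = get_q_cycle_alt nz q0 q_max
instance (nz : Int) (q0 : Int) (q_max : Int) (out : List Int) : Decidable (Spec_get_q_cycle nz q0 q_max out) := by unfold Spec_get_q_cycle; infer_instance

-- ===== CLAIM =====
def Claim_equal_get_q_cycle : Prop := ∀ (nz : Int) (q0 : Int) (q_max : Int), Dom_get_q_cycle nz q0 q_max → Spec_get_q_cycle nz q0 q_max (get_q_cycle nz q0 q_max)

-- ===== LEMMAS AND PROOFS =====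

lemma next_reflection_min (q s m t : Int) (h : next_reflection q s m = some t)
    (b : Int) (hb : b = 0 ∨ b = m) (hahead : 0 < (b - q) * s) : 0 ≤ (b - t) * s := by
  have hsne : s ≠ 0 := fun h0 => by rw [h0, mul_zero] at hahead; exact lt_irrefl 0 hahead
  have hbmem : b ∈ (if 0 < (0 - q) * s then [(0 : Int)] else [])
            ++ (if 0 < (m - q) * s then [m] else []) := by
    rcases hb with rfl | rfl
    · exact List.mem_append.2 (Or.inl (by rw [if_pos hahead]; exact List.mem_singleton_self _))
    · exact List.mem_append.2 (Or.inr (by rw [if_pos hahead]; exact List.mem_singleton_self _))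
  simp only [next_reflection] at h
  by_cases hs : 0 < s
  · rw [if_pos hs] at h
    have hle : t ≤ b := by simpa using PySem.List.min?_isMin h b hbmem
    exact mul_nonneg (by omega) (le_of_lt hs)
  · rw [if_neg hs] at h
    have hle : b ≤ t := by simpa using PySem.List.max?_isMax h b hbmem
    have hneg : s < 0 := lt_of_le_of_ne (not_lt.1 hs) hsne
    nlinarith

lemma next_reflection_none (q s m : Int) (h : next_reflection q s m = none)
    (b : Int) (hb : b = 0 ∨ b = m) : ¬ 0 < (b - q) * s := by
  intro hahead
  have hbmem : b ∈ (if 0 < (0 - q) * s then [(0 : Int)] else [])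
            ++ (if 0 < (m - q) * s then [m] else []) := by
    rcases hb with rfl | rfl
    · exact List.mem_append.2 (Or.inl (by rw [if_pos hahead]; exact List.mem_singleton_self _))
    · exact List.mem_append.2 (Or.inr (by rw [if_pos hahead]; exact List.mem_singleton_self _))
  simp only [next_reflection] at h
  by_cases hs : 0 < s
  · rw [if_pos hs, PySem.List.min?_eq_none_iff] at h
    rw [h] at hbmem; exact absurd hbmem (List.not_mem_nil)
  · rw [if_neg hs, PySem.List.max?_eq_none_iff] at h
    rw [h] at hbmem; exact absurd hbmem (List.not_mem_nil)

lemma go_acc (m : Int) : ∀ (rem : Nat) (acc : List Int) (q s : Int),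
    get_q_cycle_go m rem acc q s = acc ++ get_q_cycle_go m rem [] q s := by
  intro rem
  induction rem with
  | zero => intro acc q s; simp [get_q_cycle_go]
  | succ r ih =>
    intro acc q s
    simp only [get_q_cycle_go, List.nil_append]
    rw [ih (acc ++ [q + s]), ih [q + s]]
    simp [List.append_assoc]

lemma ramp_cons (q s : Int) (r : Nat) :
    (q + s) :: (List.range r).map (fun k : Nat => (q + s) + s * ((k : Int) + 1))
      = (List.range (r + 1)).map (fun k : Nat => q + s * ((k : Int) + 1)) := by
  rw [List.range_succ_eq_map, List.map_cons, List.map_map]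
  congr 1
  · push_cast; ring
  · apply List.map_congr_left
    intro k _
    simp only [Function.comp_apply]
    push_cast; ring

-- no reflection point ahead: A never flips, pure ramp
lemma go_ramp (m : Int) : ∀ (rem : Nat) (q s : Int),
    (∀ j : Int, 1 ≤ j → q + s * j ≠ 0 ∧ q + s * j ≠ m) →
    get_q_cycle_go m rem [] q s = (List.range rem).map (fun k : Nat => q + s * ((k : Int) + 1)) := by
  intro rem
  induction rem with
  | zero => intro q s _; simp [get_q_cycle_go]
  | succ r ih =>
    intro q s hno
    have h1 := hno 1 le_rfl
    rw [mul_one] at h1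
    simp only [get_q_cycle_go, List.nil_append]
    rw [if_neg (by tauto)]
    rw [go_acc, ih (q + s) s (fun j hj => by
      have h2 := hno (j + 1) (by omega)
      have e : q + s * (j + 1) = q + s + s * j := by ring
      rw [e] at h2
      exact h2)]
    exact ramp_cons q s r

-- t is the first reflection point ahead of q: A emits the run to t unreflected, flips at t
lemma go_flip (m s : Int) (hs : s = 1 ∨ s = -1) : ∀ (rem : Nat) (q t : Int),
    (t = 0 ∨ t = m) → 0 < (t - q) * s →
    (∀ b : Int, (b = 0 ∨ b = m) → 0 < (b - q) * s → 0 ≤ (b - t) * s) →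
    get_q_cycle_go m rem [] q s =
      if rem ≤ (t - q).natAbs
      then (List.range rem).map (fun k : Nat => q + s * ((k : Int) + 1))
      else (List.range (t - q).natAbs).map (fun k : Nat => q + s * ((k : Int) + 1))
            ++ get_q_cycle_go m (rem - (t - q).natAbs) [] t (-s) := by
  intro rem
  induction rem with
  | zero =>
    intro q t _ _ _
    rw [if_pos (Nat.zero_le _)]
    simp [get_q_cycle_go]
  | succ r ih =>
    intro q t ht hpos hmin
    have hss : s * s = 1 := by rcases hs with rfl | rfl <;> norm_num
    have habs : ((t - q).natAbs : Int) = (t - q) * s := by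
      rcases hs with rfl | rfl
      · rw [mul_one]; rw [mul_one] at hpos; omega
      · rw [mul_neg_one]; rw [mul_neg_one] at hpos; omega
    by_cases hd1 : q + s = t
    · -- next element is t: the flip fires
      have hflip : q + s = m ∨ q + s = 0 := by
        rcases ht with h' | h'
        · exact Or.inr (by rw [hd1, h'])
        · exact Or.inl (by rw [hd1, h'])
      have hdval : (t - q).natAbs = 1 := by
        have : t - q = s := by omega
        rcases hs with rfl | rfl <;> rw [this] <;> rfl
      simp only [get_q_cycle_go, List.nil_append]
      rw [if_pos hflip, go_acc, hdval]
      by_cases hr : r = 0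
      · subst hr
        rw [if_pos le_rfl]
        simp [get_q_cycle_go, List.range_succ]
      · rw [if_neg (by omega), hd1]
        have e : (List.range 1).map (fun k : Nat => q + s * ((k : Int) + 1)) = [t] := by
          rw [← hd1]
          simp [List.range_one]
        rw [e]
        have hr1 : r + 1 - 1 = r := by omega
        rw [hr1]
    · -- next element q + s is strictly before t: no flip
      have hD2 : 2 ≤ (t - q) * s := by
        have h1le : (1 : Int) ≤ (t - q) * s := hpos
        rcases lt_or_eq_of_le h1le with h' | h'
        · omega
        · exfalso
          apply hd1
          have : t - q = ((t - q) * s) * s := by rw [mul_assoc, hss, mul_one]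
          rw [← h', one_mul] at this
          omega
      have hnoflip : ¬ (q + s = m ∨ q + s = 0) := by
        intro hc
        have hb : q + s = 0 ∨ q + s = m := hc.symm
        have hba : 0 < (q + s - q) * s := by
          have : (q + s - q) * s = s * s := by ring
          rw [this, hss]; norm_num
        have hge := hmin (q + s) hb hba
        have : (q + s - t) * s = s * s - (t - q) * s := by ring
        rw [this, hss] at hge
        omega
      simp only [get_q_cycle_go, List.nil_append]
      rw [if_neg hnoflip, go_acc]
      have hpos' : 0 < (t - (q + s)) * s := by
        have : (t - (q + s)) * s = (t - q) * s - s * s := by ring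
        rw [this, hss]; omega
      have hmin' : ∀ b : Int, (b = 0 ∨ b = m) → 0 < (b - (q + s)) * s → 0 ≤ (b - t) * s := by
        intro b hb hba
        apply hmin b hb
        have : (b - q) * s = (b - (q + s)) * s + s * s := by ring
        rw [this, hss]; omega
      rw [ih (q + s) t ht hpos' hmin']
      have habs' : ((t - (q + s)).natAbs : Int) = (t - (q + s)) * s := by
        rcases hs with rfl | rfl
        · rw [mul_one]; rw [mul_one] at hpos'; omega
        · rw [mul_neg_one]; rw [mul_neg_one] at hpos'; omega
      have hdd : (t - (q + s)).natAbs = (t - q).natAbs - 1 := by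
        have e : (t - (q + s)) * s = (t - q) * s - s * s := by ring
        rw [e, hss] at habs'
        omega
      have hd1le : 1 ≤ (t - q).natAbs := by omega
      by_cases hcase : r + 1 ≤ (t - q).natAbs
      · rw [if_pos (by omega), if_pos hcase]
        exact ramp_cons q s r
      · rw [if_neg (by omega), if_neg hcase]
        rw [← List.append_assoc]
        congr 1
        · rw [List.singleton_append, ramp_cons q s ((t - (q + s)).natAbs)]
          rw [show (t - (q + s)).natAbs + 1 = (t - q).natAbs from by omega]
        · congr 1
          omega

-- A's stepping loop produces exactly B's run-by-run output
lemma go_eq_alt (m : Int) : ∀ (need : Nat) (q s : Int), (s = 1 ∨ s = -1) →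
    get_q_cycle_go m need [] q s = alt_go m need q s := by
  intro need
  induction need using Nat.strong_induction_on with
  | _ need ih =>
    intro q s hs
    match need with
    | 0 => simp [get_q_cycle_go, alt_go]
    | (k : Nat) + 1 =>
      cases h : next_reflection q s m with
      | none =>
        have hramp : ∀ j : Int, 1 ≤ j → q + s * j ≠ 0 ∧ q + s * j ≠ m := by
          intro j hj
          have h0 := next_reflection_none q s m h 0 (Or.inl rfl)
          have hm := next_reflection_none q s m h m (Or.inr rfl)
          rcases hs with rfl | rfl
          · rw [mul_one] at h0 hm; rw [one_mul]; omega
          · rw [mul_neg_one] at h0 hm; rw [neg_one_mul]; omega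
        rw [go_ramp m (k + 1) q s hramp]
        rw [alt_go, h]
      | some t =>
        obtain ⟨ht, hpos⟩ := next_reflection_ahead q s m t h
        have hmin := fun b hb hba => next_reflection_min q s m t h b hb hba
        rw [go_flip m s hs (k + 1) q t ht hpos hmin]
        rw [alt_go, h]
        simp only
        by_cases hcase : k + 1 ≤ (t - q).natAbs
        · rw [if_pos hcase]
          have hd : min (t - q).natAbs (k + 1) = k + 1 := by omega
          rw [hd]
          have : k + 1 - (k + 1) = 0 := by omega
          rw [this]
          simp [alt_go]
        · rw [if_neg hcase]
          have hd : min (t - q).natAbs (k + 1) = (t - q).natAbs := by omega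
          rw [hd]
          congr 1
          exact ih (k + 1 - (t - q).natAbs) (by
              have h1 : 1 ≤ (t - q).natAbs :=
                Int.natAbs_pos.2 (sub_ne_zero.2 (next_reflection_ne q s m t h))
              omega) t (-s)
            (by rcases hs with rfl | rfl <;> simp)

-- ===== VERDICT =====
theorem get_q_cycle_spec : Claim_equal_get_q_cycle := by
  intro nz q0 m _
  unfold Spec_get_q_cycle get_q_cycle get_q_cycle_alt
  show get_q_cycle_go m (nz - 1).toNat [q0] q0 1 = q0 :: alt_go m ((max nz 1).toNat - 1) q0 1
  have hn : (max nz 1).toNat - 1 = (nz - 1).toNat := by omega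
  rw [hn, go_acc, go_eq_alt m ((nz - 1).toNat) q0 1 (Or.inl rfl)]
  rfl
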